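-- pv_equiv track=rewrite | github.com/subhan17/langchain-qe-tc-generator | app/test_generator.py | convert_gherkin_to_pytest
-- ===== SOURCE A (Python) =====
-- def convert_gherkin_to_pytest(gherkin_text):
--     # lines = gherkin_text.strip().split("\n")
--     # scenario = ""
--     # steps = []
--     # method_name = "test_generated"
--     #
--     # for line in lines:
--     #     line = line.strip()
--     #     if line.startswith("Scenario:"):
--     #         scenario = line.replace("Scenario:", "").strip()
--     #         method_name = "test_" + re.sub(r'\W+', '_', scenario.lower())
--     #     elif line.startswith(("Given", "When", "Then", "And")):
--     #         steps.append(line)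
--     #
--     # code_lines = [
--     #     "import pytest",
--     #     "from playwright.sync_api import Page, expect",
--     #     "",
--     #     f"@pytest.mark.scenario(\"{scenario}\")",
--     #     f"def {method_name}(page: Page):"
--     # ]
--     #
--     # for step in steps:
--     #     step = step.strip()
--     #     comment = f"    # {step}"
--     #     action = "    pass  # TODO: implement"
--     #     code_lines.append(comment)
--     #     code_lines.append(action)
--     #
--     # return "\n".join(code_lines)
--     lines = gherkin_text.strip().split("\n")
--     test_cases = []
--     test_func = ""
--
--     for line in lines:
--         if line.strip().startswith("Scenario:"):
--             if test_func:
--                 test_cases.append(test_func)  # Save previous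
--             scenario_name = line.split("Scenario:")[1].strip().replace(" ", "_")
--             test_func = f"\ndef test_{scenario_name}():\n"
--         elif line.strip().startswith(("Given", "When", "Then", "And", "But")):
--             test_func += f"    # {line.strip()}\n"
--
--     if test_func:  # Final one
--         test_cases.append(test_func)
--
--     return "\n".join(test_cases)
-- ===== SOURCE B (Python) =====
-- def convert_gherkin_to_pytest(gherkin_text):
--     lines = gherkin_text.strip().split("\n")
--     # Partition lines into blocks: a new block starts at each Scenario line;
--     # lines before the first Scenario form an initial header-less block.
--     blocks = [[]]
--     for line in lines:
--         if line.strip().startswith("Scenario:"):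
--             blocks.append([line])
--         else:
--             blocks[-1].append(line)
--     # Render each block independently, keep the non-empty renderings.
--     rendered = [text for text in map(_render_block, blocks) if text]
--     return "\n".join(rendered)
--
--
-- def _render_block(block):
--     text = ""
--     for line in block:
--         s = line.strip()
--         if s.startswith("Scenario:"):
--             name = line.split("Scenario:")[1].strip().replace(" ", "_")
--             text += f"\ndef test_{name}():\n"
--         elif s.startswith(("Given", "When", "Then", "And", "But")):
--             text += f"    # {s}\n"
--     return text
-- ===== Notes on version B (the rewrite author's own statement) =====
-- stated objective: alternative
-- what changed: Replaces the single-pass accumulator-with-flush (carrying the current function text and flushing it at each new Scenario and at the end) by a group-first-then-format pass: lines are partitioned into blocks starting at each Scenario line, each block is rendered independently, and the non-empty renderings are joined.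
import Mathlib
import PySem

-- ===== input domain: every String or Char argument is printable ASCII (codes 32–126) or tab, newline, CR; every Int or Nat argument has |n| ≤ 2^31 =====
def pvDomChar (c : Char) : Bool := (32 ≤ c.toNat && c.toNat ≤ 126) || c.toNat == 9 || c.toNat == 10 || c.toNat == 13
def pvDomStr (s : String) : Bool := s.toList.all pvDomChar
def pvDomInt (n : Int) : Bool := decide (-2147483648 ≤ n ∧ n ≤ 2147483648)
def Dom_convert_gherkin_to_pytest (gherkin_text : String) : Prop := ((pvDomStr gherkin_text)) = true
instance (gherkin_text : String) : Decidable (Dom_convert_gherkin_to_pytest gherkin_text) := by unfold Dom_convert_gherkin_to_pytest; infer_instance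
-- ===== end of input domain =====

-- B replaces A's accumulator-with-flush single pass by partition-into-blocks-then-render (alternative decomposition, same cost).

-- ===== PORT A =====
-- shared leaf helpers: the line tests and the two formatted strings, straight from the Python expressions
def pvIsScenario (line : String) : Bool :=
  PySem.Str.startswith (PySem.Str.strip line) "Scenario:"

def pvIsStep (line : String) : Bool :=
  let s := PySem.Str.strip line
  PySem.Str.startswith s "Given" || PySem.Str.startswith s "When" ||
  PySem.Str.startswith s "Then" || PySem.Str.startswith s "And" || PySem.Str.startswith s "But"

-- line.split("Scenario:")[1].strip().replace(" ", "_"); the [1] is guarded by startswith,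
-- so the index always exists and the .getD "" default is never taken
def pvHeader (line : String) : String :=
  let name := PySem.Str.replace
      (PySem.Str.strip ((PySem.List.pyGet? ((PySem.Str.split? line "Scenario:").getD []) 1).getD "")) " " "_"
  "\ndef test_" ++ name ++ "():\n"

def pvStepLine (line : String) : String := "    # " ++ PySem.Str.strip line ++ "\n"

-- the body of A's for-loop, on the state (test_cases, test_func)
def pvStepA (st : List String × String) (line : String) : List String × String :=
  if pvIsScenario line then
    ((if st.2 = "" then st.1 else st.1 ++ [st.2]), pvHeader line)
  else if pvIsStep line then (st.1, st.2 ++ pvStepLine line)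
  else st

def convert_gherkin_to_pytest (gherkin_text : String) : String :=
  let lines := (PySem.Str.split? (PySem.Str.strip gherkin_text) "\n").getD []
  let st := lines.foldl pvStepA ([], "")
  let test_cases := if st.2 = "" then st.1 else st.1 ++ [st.2]
  PySem.Str.join "\n" test_cases

-- ===== PORT B =====
-- blocks[-1] is the `cur` argument; a Scenario line closes it and starts a fresh block
def pvBlocks (cur : List String) : List String → List (List String)
  | [] => [cur]
  | l :: ls => if pvIsScenario l then cur :: pvBlocks [l] ls else pvBlocks (cur ++ [l]) ls

-- _render_block: per-line contribution folded over the block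
def pvContrib (line : String) : String :=
  if pvIsScenario line then pvHeader line
  else if pvIsStep line then pvStepLine line
  else ""

def pvRender (block : List String) : String :=
  block.foldl (fun text l => text ++ pvContrib l) ""

def convert_gherkin_to_pytest_alt (gherkin_text : String) : String :=
  let lines := (PySem.Str.split? (PySem.Str.strip gherkin_text) "\n").getD []
  let rendered := ((pvBlocks [] lines).map pvRender).filter (· ≠ "")
  PySem.Str.join "\n" rendered

-- ===== PRECONDITION & SPEC =====
def Spec_convert_gherkin_to_pytest (gherkin_text : String) (out : String) : Prop := out = convert_gherkin_to_pytest_alt gherkin_text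
instance (gherkin_text : String) (out : String) : Decidable (Spec_convert_gherkin_to_pytest gherkin_text out) := by unfold Spec_convert_gherkin_to_pytest; infer_instance

-- ===== CLAIM (what is proved, stated in full; the proofs are below) =====
def Claim_equal_convert_gherkin_to_pytest : Prop := ∀ (gherkin_text : String), Dom_convert_gherkin_to_pytest gherkin_text → Spec_convert_gherkin_to_pytest gherkin_text (convert_gherkin_to_pytest gherkin_text)

-- ===== LEMMAS AND PROOFS =====

lemma pvRender_append_singleton (cur : List String) (l : String) :
    pvRender (cur ++ [l]) = pvRender cur ++ pvContrib l := by
  simp [pvRender, List.foldl_append]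

lemma pvRender_scenario (l : String) (h : pvIsScenario l = true) :
    pvRender [l] = pvHeader l := by
  simp [pvRender, pvContrib, h]

-- main invariant: running A's loop (plus the final flush) from state (cases, pvRender cur)
-- yields exactly `cases` followed by the non-empty renderings of the blocks of the rest
lemma pvKey (rest : List String) :
    ∀ (cases : List String) (cur : List String),
      (let st := rest.foldl pvStepA (cases, pvRender cur)
       if st.2 = "" then st.1 else st.1 ++ [st.2])
      = cases ++ ((pvBlocks cur rest).map pvRender).filter (· ≠ "") := by
  induction rest with
  | nil =>
      intro cases cur
      simp only [List.foldl_nil, pvBlocks, List.map, List.filter]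
      by_cases h : pvRender cur = "" <;> simp [h]
  | cons l ls ih =>
      intro cases cur
      simp only [List.foldl_cons, pvStepA, pvBlocks]
      by_cases hs : pvIsScenario l
      · simp only [hs, if_true]
        have h1 : pvHeader l = pvRender [l] := (pvRender_scenario l hs).symm
        rw [h1]
        by_cases h : pvRender cur = ""
        · simp only [h, if_true, ih cases [l]]
          simp [h]
        · simp only [h, if_false, ih (cases ++ [pvRender cur]) [l]]
          simp [h]
      · simp only [hs, Bool.false_eq_true, if_false]
        by_cases hstep : pvIsStep l
        · simp only [hstep, if_true]
          have h2 : pvRender cur ++ pvStepLine l = pvRender (cur ++ [l]) := by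
            rw [pvRender_append_singleton]; simp [pvContrib, hs, hstep]
          rw [h2, ih cases (cur ++ [l])]
        · simp only [hstep, Bool.false_eq_true, if_false]
          have h2 : pvRender cur = pvRender (cur ++ [l]) := by
            rw [pvRender_append_singleton]; simp [pvContrib, hs, hstep]
          conv_lhs => rw [h2]
          rw [ih cases (cur ++ [l])]

-- ===== VERDICT (by name: the statement is the Claim_ definition above) =====
theorem convert_gherkin_to_pytest_spec : Claim_equal_convert_gherkin_to_pytest := by
  intro t _
  show _ = _
  unfold convert_gherkin_to_pytest convert_gherkin_to_pytest_alt
  have h := pvKey ((PySem.Str.split? (PySem.Str.strip t) "\n").getD []) [] []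
  have e : pvRender [] = "" := rfl
  rw [e] at h
  simp only []
  rw [h, List.nil_append]
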